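-- pv_equiv track=rewrite | github.com/daniel-reich/turbo-robot | 6kseWBaSTv6GgaKDS_16.py | next_letters
-- ===== SOURCE A (Python) =====
-- def next_letters(s):
--   temp = list(s)
--   temp2 = []
--   output = ""
--   count = 1
--   carry = 1
--   for c in temp[::-1]:
--     carry = 0
--     if(c == 'Z'):
--       if(count == 1):
--         temp2.insert(0,'A')
--         carry = 1
--       else:
--         temp2.insert(0,c)
--         count = 0
--     else:
--       if(count == 1):
--         temp2.insert(0,chr(ord(c)+1))
--         count = 0
--       else:
--         temp2.insert(0,c)
--         count = 0
--   if carry: temp2.insert(0, 'A')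
--   for t in temp2:
--     output += t
--   return output
-- ===== SOURCE B (Python) =====
-- def next_letters(s):
--     i = len(s) - 1
--     while i >= 0 and s[i] == 'Z':
--         i -= 1
--     if i < 0:
--         return 'A' * (len(s) + 1)
--     return s[:i] + chr(ord(s[i]) + 1) + 'A' * (len(s) - 1 - i)
-- ===== Notes on version B (the rewrite author's own statement) =====
-- stated objective: faster
-- what changed: Replaces the per-character carry loop with state flags and repeated insert(0,...) plus string += by a right-to-left scan for the first non-Z character and one slice-and-concatenate construction.
import Mathlib
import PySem

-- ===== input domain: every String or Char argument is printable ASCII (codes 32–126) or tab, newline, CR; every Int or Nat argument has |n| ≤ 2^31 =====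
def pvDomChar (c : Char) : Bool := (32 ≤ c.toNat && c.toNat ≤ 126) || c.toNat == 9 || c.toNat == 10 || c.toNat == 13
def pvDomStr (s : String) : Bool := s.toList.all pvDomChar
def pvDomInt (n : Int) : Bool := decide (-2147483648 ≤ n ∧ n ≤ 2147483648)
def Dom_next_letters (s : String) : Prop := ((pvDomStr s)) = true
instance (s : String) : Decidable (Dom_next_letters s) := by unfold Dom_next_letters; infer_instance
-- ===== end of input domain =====

-- B replaces A's per-character carry loop (count/carry flags + insert(0,..)) by a scan
-- for the rightmost non-'Z' character and one slice-and-concatenate construction (simpler).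


-- ===== PORT A =====
-- one loop step of A: state is (temp2, count, carry); 'carry = 0' at the top of the body
def pvStepA (st : List Char × Nat × Nat) (c : Char) : List Char × Nat × Nat :=
  let temp2 := st.1
  let count := st.2.1
  if c == 'Z' then
    if count == 1 then ('A' :: temp2, count, 1)
    else (c :: temp2, 0, 0)
  else
    if count == 1 then (Char.ofNat (c.toNat + 1) :: temp2, 0, 0)
    else (c :: temp2, 0, 0)

def next_letters (s : String) : String :=
  let temp := s.toList
  -- for c in temp[::-1]: …   ([::-1] is reversal)
  let st := (temp.reverse).foldl pvStepA ([], 1, 1)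
  let temp2 := if st.2.2 ≠ 0 then 'A' :: st.1 else st.1
  -- for t in temp2: output += t
  temp2.foldl (fun output t => output.push t) ""

-- ===== PORT B =====
-- the while loop: strip leading 'Z's of the REVERSED character list, counting them
def pvStrip : List Char → List Char × Nat
  | [] => ([], 0)
  | c :: rest => if c == 'Z' then ((pvStrip rest).1, (pvStrip rest).2 + 1) else (c :: rest, 0)

def next_letters_alt (s : String) : String :=
  let p := pvStrip s.toList.reverse
  match p with
  | ([], _) => String.ofList (List.replicate (s.toList.length + 1) 'A')
  | (c :: preRev, n) => String.ofList (preRev.reverse ++ Char.ofNat (c.toNat + 1) :: List.replicate n 'A')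

-- ===== PRECONDITION & SPEC =====
def Spec_next_letters (s : String) (out : String) : Prop := out = next_letters_alt s
instance (s : String) (out : String) : Decidable (Spec_next_letters s out) := by unfold Spec_next_letters; infer_instance

-- ===== CLAIM (what is proved, stated in full; the proofs are below) =====
def Claim_equal_next_letters : Prop := ∀ (s : String), Dom_next_letters s → Spec_next_letters s (next_letters s)

-- ===== LEMMAS AND PROOFS =====

theorem push_mk (acc : List Char) (c : Char) : (String.ofList acc).push c = String.ofList (acc ++ [c]) := by
  apply String.toList_inj.mp
  simp [String.toList_ofList]

theorem foldl_push (l acc : List Char) :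
    l.foldl (fun output t => output.push t) (String.ofList acc) = String.ofList (acc ++ l) := by
  induction l generalizing acc with
  | nil => simp
  | cons c l ih =>
    rw [List.foldl_cons, push_mk, ih (acc ++ [c])]
    simp

theorem stepA_copy (acc : List Char) (c : Char) : pvStepA (acc, 0, 0) c = (c :: acc, 0, 0) := by
  simp only [pvStepA]; split <;> rfl

-- after the first non-'Z' character, every step just prepends the character
theorem foldl_stepA_copy (r acc : List Char) :
    r.foldl pvStepA (acc, 0, 0) = (r.reverse ++ acc, 0, 0) := by
  induction r generalizing acc with
  | nil => simp
  | cons c r ih => simp [stepA_copy, ih (c :: acc)]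

-- the whole loop, characterised by pvStrip of the reversed input
theorem foldl_stepA (r acc : List Char) :
    r.foldl pvStepA (acc, 1, 1) =
      match pvStrip r with
      | ([], n) => (List.replicate n 'A' ++ acc, 1, 1)
      | (c :: preRev, n) =>
          (preRev.reverse ++ Char.ofNat (c.toNat + 1) :: List.replicate n 'A' ++ acc, 0, 0) := by
  induction r generalizing acc with
  | nil => simp [pvStrip]
  | cons c r ih =>
    rw [List.foldl_cons]
    by_cases h : c = 'Z'
    · subst h
      rw [show pvStepA (acc, 1, 1) 'Z' = ('A' :: acc, 1, 1) from by simp [pvStepA]]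
      rw [ih ('A' :: acc)]
      rw [show pvStrip ('Z' :: r) = ((pvStrip r).1, (pvStrip r).2 + 1) from by simp [pvStrip]]
      rcases hp : pvStrip r with ⟨l, n⟩
      cases l <;> simp [List.replicate_succ' (n := n)]
    · rw [show pvStepA (acc, 1, 1) c = (Char.ofNat (c.toNat + 1) :: acc, 0, 0) from by
        simp [pvStepA, h]]
      rw [foldl_stepA_copy]
      rw [show pvStrip (c :: r) = (c :: r, 0) from by simp [pvStrip, h]]
      simp

theorem pvStrip_nil_length (r : List Char) (n : Nat) (h : pvStrip r = ([], n)) : n = r.length := by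
  induction r generalizing n with
  | nil =>
    simp only [pvStrip] at h
    injection h with h1 h2
    simp [← h2]
  | cons c r ih =>
    by_cases hc : c = 'Z'
    · subst hc
      rw [show pvStrip ('Z' :: r) = ((pvStrip r).1, (pvStrip r).2 + 1) from by simp [pvStrip]] at h
      rcases hp : pvStrip r with ⟨l, m⟩
      rw [hp] at h
      injection h with h1 h2
      simp only at h1 h2
      have := ih m (by rw [hp, h1])
      simp only [List.length_cons]
      omega
    · simp [pvStrip, hc] at h

-- ===== VERDICT (by name: the statement is the Claim_ definition above) =====
theorem next_letters_spec : Claim_equal_next_letters := by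
  intro s _
  show next_letters s = next_letters_alt s
  simp only [next_letters, next_letters_alt]
  rw [foldl_stepA]
  rcases hp : pvStrip s.toList.reverse with ⟨l, n⟩
  cases l with
  | nil =>
    have hn : n = s.toList.length := by simpa using pvStrip_nil_length _ n hp
    simp only [hn]
    have := foldl_push ('A' :: List.replicate s.toList.length 'A') []
    simpa [List.replicate_succ] using this
  | cons c preRev =>
    have := foldl_push (preRev.reverse ++ Char.ofNat (c.toNat + 1) :: List.replicate n 'A') []
    simpa using this
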